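-- pv_equiv track=rewrite | github.com/rigizer/algorithm | 백준/Silver/32373. 장난감 자물쇠/장난감 자물쇠.py | calc
-- ===== SOURCE A (Python) =====
-- def calc(n, k, a):
--     groups = {}
--     for i in range(n):
--         r = i % k
--         if r not in groups:
--             groups[r] = []
--         groups[r].append(a[i])
--
--     for r in groups:
--         groups[r].sort()
--
--     sorted_arr = [0] * n
--     indices = {r: 0 for r in groups}
--
--     for i in range(n):
--         r = i % k
--         sorted_arr[i] = groups[r][indices[r]]
--         indices[r] += 1
--
--     return sorted_arr == sorted(a)
-- ===== SOURCE B (Python) =====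
-- def calc(n, k, a):
--     need = {}
--     for i, x in enumerate(sorted(a)):
--         key = (i % k, x)
--         need[key] = need.get(key, 0) + 1
--     for i in range(n):
--         key = (i % k, a[i])
--         if need.get(key, 0) == 0:
--             return False
--         need[key] -= 1
--     return all(v == 0 for v in need.values())
-- ===== Notes on version B (the rewrite author's own statement) =====
-- stated objective: alternative
-- what changed: B never builds the rearranged array: it counts (i % k, value) pairs of sorted(a) in one dict and consumes that multiset in a single early-exit pass over a's first n elements, using that residue-wise sorting reproduces sorted(a) iff each residue class already holds the right multiset; Pre_ requires n <= len(a) (beyond it A raises IndexError) and k != 0 unless a is empty (with k = 0 and nonempty a, A raises ZeroDivisionError for n >= 1, and for n <= 0 returns False where B's counting loop itself raises ZeroDivisionError).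
-- outside the precondition, e.g. on calc(0, 0, [1]): A returns False, B raises ZeroDivisionError
import Mathlib
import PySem

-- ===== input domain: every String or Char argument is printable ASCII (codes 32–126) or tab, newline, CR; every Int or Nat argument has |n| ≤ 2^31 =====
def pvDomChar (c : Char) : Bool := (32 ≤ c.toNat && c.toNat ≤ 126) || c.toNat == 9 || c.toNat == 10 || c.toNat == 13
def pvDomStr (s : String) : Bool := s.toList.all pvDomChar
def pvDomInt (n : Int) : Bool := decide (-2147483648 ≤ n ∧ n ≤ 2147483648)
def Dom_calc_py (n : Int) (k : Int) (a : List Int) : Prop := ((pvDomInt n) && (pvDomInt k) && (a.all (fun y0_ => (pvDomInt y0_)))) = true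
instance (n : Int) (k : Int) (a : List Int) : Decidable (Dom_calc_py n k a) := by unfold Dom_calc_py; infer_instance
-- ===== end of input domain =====

-- B never builds the rearranged array: it counts (i % k, value) pairs of sorted(a) in one dict
-- and consumes them in a single pass over the input, with an early exit; objective: alternative.

-- ===== PORT A =====
def calc_py (n : Int) (k : Int) (a : List Int) : Bool :=
  -- groups = {}; for i in range(n): r = i % k; if r not in groups: groups[r] = []; groups[r].append(a[i])
  let groups : PySem.Dict Int (List Int) :=
    (PySem.List.pyRange 0 n 1).foldl
      (fun g i =>
        let r := PySem.Int.mod i k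
        let g := if g.contains r then g else g.insert r ([] : List Int)
        g.modify r [] (fun l => l ++ [PySem.List.pyGetD a i 0]))
      PySem.Dict.empty
  -- for r in groups: groups[r].sort()
  let groups := groups.keys.foldl
      (fun g r => g.modify r [] (fun l => PySem.List.sorted l (fun x => x) false)) groups
  -- sorted_arr = [0] * n; indices = {r: 0 for r in groups}
  let indices : PySem.Dict Int Int :=
    groups.keys.foldl (fun d r => d.insert r (0 : Int)) PySem.Dict.empty
  -- for i in range(n): r = i % k; sorted_arr[i] = groups[r][indices[r]]; indices[r] += 1
  let st :=
    (PySem.List.pyRange 0 n 1).foldl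
      (fun (st : List Int × PySem.Dict Int Int) i =>
        let r := PySem.Int.mod i k
        let v := PySem.List.pyGetD (groups.getD r []) (st.2.getD r 0) 0
        (PySem.List.pySetD st.1 i v, st.2.insert r (st.2.getD r 0 + 1)))
      (List.replicate n.toNat 0, indices)
  -- return sorted_arr == sorted(a)
  decide (st.1 = PySem.List.sorted a (fun x => x) false)

-- ===== PORT B =====
-- the second loop with its early 'return False', then the final all-zero check
def pvGo (k : Int) (a : List Int) : List Int → PySem.Dict (Int × Int) Int → Bool
  | [], need => need.values.all (fun v => v == 0)
  | i :: rest, need =>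
      -- key = (i % k, a[i]); if need.get(key, 0) == 0: return False; need[key] -= 1
      if need.getD (PySem.Int.mod i k, PySem.List.pyGetD a i 0) 0 == 0 then false
      else pvGo k a rest
        (need.insert (PySem.Int.mod i k, PySem.List.pyGetD a i 0)
          (need.getD (PySem.Int.mod i k, PySem.List.pyGetD a i 0) 0 - 1))

def calc_py_alt (n : Int) (k : Int) (a : List Int) : Bool :=
  -- need = {}; for i, x in enumerate(sorted(a)): need[(i % k, x)] = need.get((i % k, x), 0) + 1
  let need :=
    (PySem.List.enumerate (PySem.List.sorted a (fun x => x) false)).foldl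
      (fun d p => d.insert (PySem.Int.mod p.1 k, p.2) (d.getD (PySem.Int.mod p.1 k, p.2) 0 + 1))
      PySem.Dict.empty
  -- for i in range(n): …early False…; return all(v == 0 for v in need.values())
  pvGo k a (PySem.List.pyRange 0 n 1) need

-- ===== PRECONDITION & SPEC =====
-- Pre_ requires n ≤ len(a) and (k ≠ 0 or a empty): n > len(a) makes A raise IndexError,
-- and with k = 0 and a nonempty A's value (for n ≤ 0) is unreachable for B, whose counting
-- loop over enumerate(sorted(a)) raises ZeroDivisionError there.
def Pre_calc_py (n : Int) (k : Int) (a : List Int) : Prop :=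
  n ≤ (a.length : Int) ∧ (k ≠ 0 ∨ a = [])
instance (n : Int) (k : Int) (a : List Int) : Decidable (Pre_calc_py n k a) := by unfold Pre_calc_py; infer_instance

def pvWitness_calc_py : Int × Int × List Int := (3, 2, [3, 1, 2])

def Spec_calc_py (n : Int) (k : Int) (a : List Int) (out : Bool) : Prop := out = calc_py_alt n k a
instance (n : Int) (k : Int) (a : List Int) (out : Bool) : Decidable (Spec_calc_py n k a out) := by unfold Spec_calc_py; infer_instance

-- ===== CLAIM (what is proved, stated in full; the proofs are below) =====
def Claim_equal_calc_py : Prop := ∀ (n : Int) (k : Int) (a : List Int), Dom_calc_py n k a → Pre_calc_py n k a → Spec_calc_py n k a (calc_py n k a)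

-- ===== LEMMAS AND PROOFS =====

-- number of indices j < N with j % k' = r  (closed ceiling form, valid for r < k')
def pvCnt (N k' r : Nat) : Nat := (N - r + (k' - 1)) / k'

-- the residue class p[r::k'] as a list
def pvCls (p : List Int) (k' r : Nat) : List Int :=
  (List.range (pvCnt p.length k' r)).map (fun q => p.getD (r + k' * q) 0)

-- value at position j of the residue-wise sorted rearrangement of p
def pvTarget (p : List Int) (k' j : Nat) : Int :=
  (PySem.List.sorted (pvCls p k' (j % k')) (fun x => x) false).getD (j / k') 0

def pvL (p : List Int) (k' : Nat) : List Int := (List.range p.length).map (pvTarget p k')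

lemma lt_pvCnt_iff {k' : Nat} (hk : 0 < k') (A q : Nat) :
    q < (A + (k' - 1)) / k' ↔ k' * q < A := by
  constructor
  · intro h
    have h1 : k' * (q + 1) ≤ k' * ((A + (k' - 1)) / k') := Nat.mul_le_mul_left _ h
    have h2 : k' * ((A + (k' - 1)) / k') ≤ A + (k' - 1) := Nat.mul_div_le _ _
    rw [Nat.mul_succ] at h1
    omega
  · intro h
    rw [Nat.lt_iff_add_one_le, Nat.le_div_iff_mul_le hk, add_mul, one_mul, mul_comm]
    omega

lemma countP_mod_formula {k' : Nat} (hk : 0 < k') (r : Nat) (hr : r < k') (m : Nat) :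
    (List.range m).countP (fun j => j % k' = r) = m / k' + (if r < m % k' then 1 else 0) := by
  induction m with
  | zero => simp
  | succ m ih =>
    rw [List.range_succ, List.countP_append, ih]
    have hd := Nat.div_add_mod m k'
    have he : m % k' < k' := Nat.mod_lt _ hk
    by_cases hc : m % k' + 1 = k'
    · have h1 : m + 1 = k' * (m / k') + k' := by omega
      have h2 : (m + 1) / k' = m / k' + 1 := by
        rw [h1, Nat.mul_add_div hk, Nat.div_self hk]
      have h3 : (m + 1) % k' = 0 := by
        rw [h1, Nat.mul_add_mod, Nat.mod_self]
      rw [h2, h3]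
      simp only [List.countP_cons, List.countP_nil, decide_eq_true_eq, Nat.zero_add]
      split_ifs <;> omega
    · have h1 : m + 1 = k' * (m / k') + (m % k' + 1) := by omega
      have h2 : (m + 1) / k' = m / k' := by
        rw [h1, Nat.mul_add_div hk, Nat.div_eq_of_lt (show m % k' + 1 < k' by omega)]; omega
      have h3 : (m + 1) % k' = m % k' + 1 := by
        rw [h1, Nat.mul_add_mod, Nat.mod_eq_of_lt (by omega)]
      rw [h2, h3]
      simp only [List.countP_cons, List.countP_nil, decide_eq_true_eq, Nat.zero_add]
      split_ifs <;> omega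

lemma pvCnt_eq_countP {k' : Nat} (hk : 0 < k') {r : Nat} (hr : r < k') (N : Nat) :
    pvCnt N k' r = (List.range N).countP (fun j => j % k' = r) := by
  rw [countP_mod_formula hk r hr]
  unfold pvCnt
  have hd := Nat.div_add_mod N k'
  have hE : N % k' < k' := Nat.mod_lt _ hk
  rcases lt_or_ge r (N % k') with h | h
  · have hx : k' * (N / k' + 1) = k' * (N / k') + k' := by ring
    have h1 : N - r + (k' - 1) = k' * (N / k' + 1) + (N % k' - r - 1) := by omega
    rw [h1, Nat.mul_add_div hk, Nat.div_eq_of_lt (show N % k' - r - 1 < k' by omega)]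
    simp [h]
  · rcases le_or_gt r N with h2 | h2
    · have h1 : N - r + (k' - 1) = k' * (N / k') + (k' - 1 - (r - N % k')) := by omega
      rw [h1, Nat.mul_add_div hk, Nat.div_eq_of_lt (show k' - 1 - (r - N % k') < k' by omega)]
      simp only [if_neg (by omega : ¬ r < N % k')]
    · have h1 : N - r + (k' - 1) = k' - 1 := by omega
      have h3 : N / k' = 0 := Nat.div_eq_of_lt (by omega)
      have h4 : N % k' = N := Nat.mod_eq_of_lt (by omega)
      rw [h1, Nat.div_eq_of_lt (by omega), h3, if_neg (by omega)]

lemma countP_mod_self {k' : Nat} (hk : 0 < k') (m : Nat) :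
    (List.range m).countP (fun j => j % k' = m % k') = m / k' := by
  rw [countP_mod_formula hk _ (Nat.mod_lt _ hk)]
  simp

lemma length_pvCls (p : List Int) (k' r : Nat) : (pvCls p k' r).length = pvCnt p.length k' r := by
  simp [pvCls]

lemma flatMap_perm_congr {α : Type} (rs : List Nat) (f g : Nat → List α)
    (h : ∀ r ∈ rs, (f r).Perm (g r)) : (rs.flatMap f).Perm (rs.flatMap g) := by
  induction rs with
  | nil => simp
  | cons r rs ih =>
    simp only [List.flatMap_cons]
    exact (h r (by simp)).append (ih (fun y hy => h y (by simp [hy])))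

lemma lt_pvCnt_of (p : List Int) {k' : Nat} (hk : 0 < k') {j : Nat} (hj : j < p.length) :
    j / k' < pvCnt p.length k' (j % k') := by
  rw [pvCnt, lt_pvCnt_iff hk]
  have := Nat.div_add_mod j k'
  have : j % k' ≤ j := Nat.mod_le _ _
  omega

lemma idx_lt_of_lt_pvCnt {k' : Nat} (hk : 0 < k') {N r q : Nat} (hq : q < pvCnt N k' r) :
    r + k' * q < N := by
  rw [pvCnt, lt_pvCnt_iff hk] at hq
  omega

lemma a_eq_interleave (p : List Int) {k' : Nat} (hk : 0 < k') :
    p = (List.range p.length).map (fun j => (pvCls p k' (j % k')).getD (j / k') 0) := by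
  apply List.ext_getElem (by simp)
  intro j hj hj2
  rw [List.getElem_map, List.getElem_range]
  rw [pvCls, PySem.List.getD_map_range _ _ _ _ (lt_pvCnt_of p hk hj)]
  have : (j % k') + k' * (j / k') = j := by
    have := Nat.div_add_mod j k'; omega
  rw [this, List.getD_eq_getElem p 0 hj]

lemma flatMap_extract {α : Type} (rs : List Nat) (c c' : Nat → List α) (r0 : Nat) (x : α)
    (hnd : rs.Nodup) (hmem : r0 ∈ rs) (h0 : c r0 = c' r0 ++ [x])
    (hne : ∀ r, r ≠ r0 → c r = c' r) :
    (rs.flatMap c).Perm ((rs.flatMap c') ++ [x]) := by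
  induction rs with
  | nil => simp at hmem
  | cons r rs ih =>
    obtain ⟨hr, hnd'⟩ := List.nodup_cons.mp hnd
    simp only [List.flatMap_cons]
    by_cases hrr : r = r0
    · subst hrr
      have htail : rs.flatMap c = rs.flatMap c' := by
        rw [List.flatMap_def, List.flatMap_def,
          List.map_congr_left (fun y hy => hne y (fun e => hr (e ▸ hy)))]
      rw [h0, htail, List.append_assoc, List.append_assoc]
      exact List.Perm.append_left _ (List.perm_append_comm)
    · rcases List.mem_cons.mp hmem with h | h
      · exact absurd h.symm hrr
      · calc (c r ++ rs.flatMap c).Perm (c' r ++ (rs.flatMap c' ++ [x])) := by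
              rw [hne r hrr]; exact List.Perm.append_left _ (ih hnd' h)
          _ = (c' r ++ rs.flatMap c') ++ [x] := by rw [List.append_assoc]

lemma interleave_perm {k' : Nat} (hk : 0 < k') :
    ∀ (N : Nat) (c : Nat → List Int),
      (∀ r, r < k' → (c r).length = (List.range N).countP (fun j => j % k' = r)) →
      ((List.range N).map (fun j => (c (j % k')).getD (j / k') 0)).Perm
        ((List.range k').flatMap c) := by
  intro N
  induction N with
  | zero =>
    intro c hlen
    simp only [List.range_zero, List.map_nil]
    have : (List.range k').flatMap c = [] := by
      rw [List.flatMap_eq_nil_iff]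
      intro r hr
      rw [List.mem_range] at hr
      have := hlen r hr
      simp only [List.range_zero, List.countP_nil] at this
      exact List.eq_nil_of_length_eq_zero this
    rw [this]
  | succ N ih =>
    intro c hlen
    have hr0 : N % k' < k' := Nat.mod_lt _ hk
    have hcnt : (List.range (N + 1)).countP (fun j => j % k' = N % k')
        = (List.range N).countP (fun j => j % k' = N % k') + 1 := by
      rw [List.range_succ, List.countP_append]
      simp
    have hq0 : (List.range N).countP (fun j => j % k' = N % k') = N / k' :=
      countP_mod_self hk N
    have hlen0 : (c (N % k')).length = N / k' + 1 := by
      rw [hlen _ hr0, hcnt, hq0]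
    have hne0 : c (N % k') ≠ [] := by
      intro h; rw [h] at hlen0; simp at hlen0
    set x := (c (N % k')).getLast hne0 with hx
    set c' : Nat → List Int := fun r => if r = N % k' then (c (N % k')).dropLast else c r with hc'
    have hsplit : c (N % k') = c' (N % k') ++ [x] := by
      simp only [hc', if_pos rfl]
      exact (List.dropLast_append_getLast hne0).symm
    have hlen' : ∀ r, r < k' → (c' r).length = (List.range N).countP (fun j => j % k' = r) := by
      intro r hr
      by_cases h : r = N % k'
      · subst h
        simp only [hc', if_pos rfl, List.length_dropLast, hlen0, hq0]
        omega
      · simp only [hc', if_neg h]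
        rw [hlen r hr, List.range_succ, List.countP_append]
        simp [Ne.symm h]
    have hmapeq : (List.range N).map (fun j => (c (j % k')).getD (j / k') 0)
        = (List.range N).map (fun j => (c' (j % k')).getD (j / k') 0) := by
      apply List.map_congr_left
      intro j hj
      rw [List.mem_range] at hj
      by_cases h : j % k' = N % k'
      · rw [h]
        simp only [hc', if_pos rfl]
        have hjq : j / k' < N / k' := by
          have h1 := Nat.div_add_mod j k'
          have h2 := Nat.div_add_mod N k'
          have h3 : k' * (j / k') < k' * (N / k') := by omega
          exact Nat.lt_of_mul_lt_mul_left h3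
        have hql : j / k' < (c (N % k')).dropLast.length := by
          rw [List.length_dropLast, hlen0]; omega
        have hql2 : j / k' < (c (N % k')).length := by rw [hlen0]; omega
        rw [List.getD_eq_getElem _ 0 hql, List.getD_eq_getElem _ 0 hql2,
          List.getElem_dropLast]
      · simp only [hc', if_neg h]
    have hlast : (c (N % k')).getD (N / k') 0 = x := by
      have hql : N / k' < (c (N % k')).length := by rw [hlen0]; omega
      rw [List.getD_eq_getElem _ 0 hql, hx, List.getLast_eq_getElem]
      congr 1
      rw [hlen0]
      omega
    have p1 : (List.range (N + 1)).map (fun j => (c (j % k')).getD (j / k') 0)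
        = ((List.range N).map (fun j => (c' (j % k')).getD (j / k') 0)) ++ [x] := by
      rw [List.range_succ, List.map_append, hmapeq]
      simp only [List.map_cons, List.map_nil, hlast]
    rw [p1]
    exact (((ih c' hlen').append_right [x]).trans
      (flatMap_extract _ c c' (N % k') x (List.nodup_range) (List.mem_range.mpr hr0)
        hsplit (fun r hr => by simp only [hc', if_neg hr])).symm)

lemma perm_flatMap_classes (p : List Int) {k' : Nat} (hk : 0 < k') :
    p.Perm ((List.range k').flatMap (fun r => pvCls p k' r)) := by
  have := interleave_perm hk p.length (fun r => pvCls p k' r) (fun r hr => by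
    rw [length_pvCls, pvCnt_eq_countP hk hr])
  rw [← a_eq_interleave p hk] at this
  exact this

lemma perm_of_classes_perm (p s : List Int) {k' : Nat} (hk : 0 < k')
    (h : ∀ r < k', (pvCls p k' r).Perm (pvCls s k' r)) : p.Perm s := by
  refine (perm_flatMap_classes p hk).trans (.trans ?_ (perm_flatMap_classes s hk).symm)
  exact flatMap_perm_congr _ _ _ (fun r hr => h r (List.mem_range.mp hr))

lemma map_getD_range_eq (l : List Int) :
    (List.range l.length).map (fun q => l.getD q 0) = l := by
  apply List.ext_getElem (by simp)
  intro j hj hj2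
  rw [List.getElem_map, List.getElem_range, List.getD_eq_getElem l 0 hj2]

lemma pairwise_pvCls (s : List Int) {k' : Nat} (hk : 0 < k') (r : Nat)
    (hs : s.Pairwise (· ≤ ·)) : (pvCls s k' r).Pairwise (· ≤ ·) := by
  rw [pvCls, List.pairwise_map]
  rw [List.pairwise_iff_getElem]
  intro i j hi hj hij
  simp only [List.length_range] at hi hj
  rw [List.getElem_range, List.getElem_range]
  have hiN : r + k' * i < s.length := idx_lt_of_lt_pvCnt hk hi
  have hjN : r + k' * j < s.length := idx_lt_of_lt_pvCnt hk hj
  rw [List.getD_eq_getElem s 0 hiN, List.getD_eq_getElem s 0 hjN]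
  exact List.pairwise_iff_getElem.mp hs _ _ _ _ (by
    have : k' * i < k' * j := (Nat.mul_lt_mul_left hk).mpr hij
    omega)

lemma pvCls_pvL (p : List Int) {k' : Nat} (hk : 0 < k') {r : Nat} (hr : r < k') :
    pvCls (pvL p k') k' r = PySem.List.sorted (pvCls p k' r) (fun x => x) false := by
  have hlen : (pvL p k').length = p.length := by simp [pvL]
  have hslen : (PySem.List.sorted (pvCls p k' r) (fun x => x) false).length
      = pvCnt p.length k' r := by
    rw [PySem.List.length_sorted, length_pvCls]
  rw [pvCls, hlen]
  have hmap : ∀ q ∈ List.range (pvCnt p.length k' r),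
      (pvL p k').getD (r + k' * q) 0
        = (PySem.List.sorted (pvCls p k' r) (fun x => x) false).getD q 0 := by
    intro q hq
    rw [List.mem_range] at hq
    have hidx : r + k' * q < p.length := idx_lt_of_lt_pvCnt hk hq
    simp only [pvL]
    rw [PySem.List.getD_map_range _ _ _ _ hidx]
    unfold pvTarget
    have h1 : (r + k' * q) % k' = r := by
      rw [Nat.add_mul_mod_self_left, Nat.mod_eq_of_lt hr]
    have h2 : (r + k' * q) / k' = q := by
      rw [Nat.add_mul_div_left _ _ hk, Nat.div_eq_of_lt hr]; omega
    rw [h1, h2]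
  rw [List.map_congr_left hmap, ← hslen, map_getD_range_eq]

-- the heart of the equivalence: the residue-wise sorted rearrangement of p equals sorted(a)
-- iff every residue class of p is a permutation of the corresponding class of sorted(a)
lemma main_iff (p a : List Int) {k' : Nat} (hk : 0 < k') :
    pvL p k' = PySem.List.sorted a (fun x => x) false
      ↔ ∀ r < k', (pvCls p k' r).Perm
          (pvCls (PySem.List.sorted a (fun x => x) false) k' r) := by
  set s := PySem.List.sorted a (fun x => x) false with hs
  have hsp : s.Pairwise (· ≤ ·) := PySem.List.sorted_pairwise a (fun x => x)
  constructor
  · intro h r hr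
    rw [← h, pvCls_pvL p hk hr]
    exact (PySem.List.sorted_perm _ _ _).symm
  · intro h
    have hperm : p.Perm s := perm_of_classes_perm p s hk h
    have hlen : (pvL p k').length = s.length := by
      simp only [pvL, List.length_map, List.length_range]
      exact hperm.length_eq
    apply List.ext_getElem hlen
    intro j hj hj2
    have hjp : j < p.length := by simp [pvL] at hj; exact hj
    simp only [pvL]
    rw [List.getElem_map, List.getElem_range]
    unfold pvTarget
    have hcls : PySem.List.sorted (pvCls p k' (j % k')) (fun x => x) false
        = pvCls s k' (j % k') := by
      exact PySem.List.sorted_id_eq_of_perm_of_pairwise _ _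
        ((h _ (Nat.mod_lt _ hk)).symm) (pairwise_pvCls s hk _ hsp)
    rw [hcls, List.getElem_of_eq (a_eq_interleave s hk) hj2, List.getElem_map,
      List.getElem_range]

-- ===== Python % with an arbitrary nonzero divisor =====

lemma mod_eq_iff_dvd_sub (k : Int) (hk : k ≠ 0) (x y : Int) :
    PySem.Int.mod x k = PySem.Int.mod y k ↔ k ∣ (x - y) := by
  have h1 := PySem.Int.floordiv_mul_add_mod x k
  have h2 := PySem.Int.floordiv_mul_add_mod y k
  constructor
  · intro hm
    exact ⟨PySem.Int.floordiv x k - PySem.Int.floordiv y k, by linear_combination h2 - h1 + hm⟩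
  · rintro ⟨t, ht⟩
    have hdvd : k ∣ (PySem.Int.mod x k - PySem.Int.mod y k) :=
      ⟨t - PySem.Int.floordiv x k + PySem.Int.floordiv y k, by linear_combination h1 - h2 + ht⟩
    have habs : |PySem.Int.mod x k - PySem.Int.mod y k| < |k| := by
      rcases lt_or_gt_of_ne hk with h | h
      · have b1 := PySem.Int.mod_neg_bounds x h
        have b2 := PySem.Int.mod_neg_bounds y h
        rw [abs_of_neg h, abs_lt]
        omega
      · have b1 := PySem.Int.mod_nonneg x h
        have b2 := PySem.Int.mod_nonneg y h
        have c1 := PySem.Int.mod_lt x h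
        have c2 := PySem.Int.mod_lt y h
        rw [abs_of_pos h, abs_lt]
        omega
    have := Int.eq_zero_of_abs_lt_dvd ((abs_dvd k _).mpr hdvd) habs
    omega

lemma mod_natCast_mod (k : Int) (hk : k ≠ 0) (j : Nat) :
    PySem.Int.mod (j : Int) k = PySem.Int.mod ((j % k.natAbs : Nat) : Int) k := by
  rw [mod_eq_iff_dvd_sub k hk]
  have hd : k ∣ ((k.natAbs : Nat) : Int) := Int.dvd_natAbs.mpr dvd_rfl
  have hj : (j : Int) - ((j % k.natAbs : Nat) : Int)
      = ((k.natAbs : Nat) : Int) * ((j / k.natAbs : Nat) : Int) := by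
    calc (j : Int) - ((j % k.natAbs : Nat) : Int)
        = ((k.natAbs * (j / k.natAbs) + j % k.natAbs : Nat) : Int) - ((j % k.natAbs : Nat) : Int) := by
          rw [Nat.div_add_mod]
      _ = ((k.natAbs : Nat) : Int) * ((j / k.natAbs : Nat) : Int) := by push_cast; ring
  rw [hj]
  exact hd.mul_right _

lemma key_inj (k : Int) (hk : k ≠ 0) {r r' : Nat} (hr : r < k.natAbs) (hr' : r' < k.natAbs)
    (h : PySem.Int.mod (r : Int) k = PySem.Int.mod (r' : Int) k) : r = r' := by
  have hdvd := (mod_eq_iff_dvd_sub k hk _ _).mp h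
  have habs : |(r : Int) - (r' : Int)| < |k| := by
    rw [abs_lt, Int.abs_eq_natAbs]
    omega
  have := Int.eq_zero_of_abs_lt_dvd ((abs_dvd k _).mpr hdvd) habs
  omega

-- ===== A-side characterization =====

lemma stepA_eq_modify (g : PySem.Dict Int (List Int)) (r : Int) (x : Int) :
    ((if g.contains r then g else g.insert r ([] : List Int)).modify r [] (fun l => l ++ [x]))
      = g.modify r [] (fun l => l ++ [x]) := by
  by_cases hc : g.contains r
  · simp [hc]
  · have hcf : g.contains r = false := by simpa using hc
    simp only [hcf, Bool.false_eq_true, if_false, PySem.Dict.modify]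
    rw [PySem.Dict.getD_insert_self, PySem.Dict.insert_insert_self,
      PySem.Dict.getD_of_not_contains g [] hcf]

lemma filter_range_core {k' : Nat} (hk : 0 < k') {r : Nat} (hr : r < k') (N : Nat) :
    (List.range N).filter (fun j => j % k' = r)
      = (List.range (pvCnt N k' r)).map (fun q => r + k' * q) := by
  induction N with
  | zero =>
    have : pvCnt 0 k' r = 0 := Nat.div_eq_of_lt (by omega)
    simp [this]
  | succ N ih =>
    have hstep : pvCnt (N + 1) k' r = pvCnt N k' r + (if N % k' = r then 1 else 0) := by
      rw [pvCnt_eq_countP hk hr, pvCnt_eq_countP hk hr, List.range_succ, List.countP_append]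
      simp
    rw [List.range_succ, List.filter_append, ih, hstep]
    by_cases hc : N % k' = r
    · have hcnt : pvCnt N k' r = N / k' := by
        rw [pvCnt_eq_countP hk hr, countP_mod_formula hk r hr]
        simp [← hc]
      have hN : r + k' * pvCnt N k' r = N := by
        rw [hcnt]
        have := Nat.div_add_mod N k'
        omega
      have hf : List.filter (fun j => decide (j % k' = r)) [N] = [N] := by simp [hc]
      rw [hf, if_pos hc, List.range_succ, List.map_append]
      simp [hN]
    · have hf : List.filter (fun j => decide (j % k' = r)) [N] = [] := by simp [hc]
      rw [hf, if_neg hc]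
      simp

lemma cls_take_eq_filter (l : List Int) {N : Nat} (hN : N ≤ l.length) {k' : Nat} (hk : 0 < k')
    {r : Nat} (hr : r < k') :
    pvCls (l.take N) k' r
      = ((List.range N).filter (fun j => decide (j % k' = r))).map (fun j => l.getD j 0) := by
  have hlen : (l.take N).length = N := by simp; omega
  rw [show (List.range N).filter (fun j => decide (j % k' = r))
      = (List.range N).filter (fun j => j % k' = r) from rfl]
  rw [filter_range_core hk hr, List.map_map, pvCls, hlen]
  apply List.map_congr_left
  intro q hq
  rw [List.mem_range] at hq
  have hidx : r + k' * q < N := idx_lt_of_lt_pvCnt hk hq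
  simp only [Function.comp_def]
  rw [List.getD_eq_getElem _ 0 (by rw [hlen]; omega : r + k' * q < (l.take N).length),
    List.getD_eq_getElem l 0 (by omega), List.getElem_take]

lemma filter_range_modK (a : List Int) (k : Int) (hknz : k ≠ 0) {N : Nat} (hN : N ≤ a.length)
    {r : Nat} (hr : r < k.natAbs) :
    ((List.range N).filter (fun (j : Nat) => PySem.Int.mod (j : Int) k == PySem.Int.mod (r : Int) k)).map
        (fun j => a.getD j 0) = pvCls (a.take N) k.natAbs r := by
  have hk : 0 < k.natAbs := by omega
  rw [cls_take_eq_filter a hN hk hr]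
  congr 1
  apply List.filter_congr
  intro j hj
  rw [Bool.eq_iff_iff, beq_iff_eq, decide_eq_true_eq]
  constructor
  · intro h
    rw [mod_natCast_mod k hknz j] at h
    exact key_inj k hknz (Nat.mod_lt _ hk) hr h
  · intro h
    rw [mod_natCast_mod k hknz j, h]

lemma groups1_getD (a : List Int) (k : Int) (N : Nat) (c : Int) :
    (((PySem.List.pyRange 0 ((N : Nat) : Int) 1).foldl
        (fun g i =>
          (if g.contains (PySem.Int.mod i k) then g
           else g.insert (PySem.Int.mod i k) ([] : List Int)).modify
            (PySem.Int.mod i k) [] (fun l => l ++ [PySem.List.pyGetD a i 0]))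
        PySem.Dict.empty).getD c [])
      = ((List.range N).filter (fun (j : Nat) => PySem.Int.mod (j : Int) k == c)).map
          (fun j => a.getD j 0) := by
  have hfun : (fun (g : PySem.Dict Int (List Int)) (i : Int) =>
        (if g.contains (PySem.Int.mod i k) then g
         else g.insert (PySem.Int.mod i k) ([] : List Int)).modify
          (PySem.Int.mod i k) [] (fun l => l ++ [PySem.List.pyGetD a i 0]))
      = (fun g i => g.modify (PySem.Int.mod i k) [] (fun l => l ++ [PySem.List.pyGetD a i 0])) := by
    funext g i
    exact stepA_eq_modify g (PySem.Int.mod i k) (PySem.List.pyGetD a i 0)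
  rw [hfun, PySem.List.pyRange_zero_nat, List.foldl_map]
  have hmain := PySem.Dict.getD_foldl_modify_append
    ((List.range N).map (fun (j : Nat) => ((PySem.Int.mod (j : Int) k, PySem.List.pyGetD a (j : Int) 0) : Int × Int)))
    PySem.Dict.empty c
  rw [List.foldl_map] at hmain
  dsimp only at hmain
  rw [hmain, List.filter_map, List.map_map]
  simp only [PySem.Dict.getD_empty, List.nil_append, Function.comp_def,
    PySem.List.pyGetD_natCast]

lemma sortfold_getD (rs : List Int) (hnd : rs.Nodup) (g : PySem.Dict Int (List Int)) (c : Int)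
    (f : List Int → List Int) :
    ((rs.foldl (fun g r => g.modify r [] f) g).getD c [])
      = if c ∈ rs then f (g.getD c []) else g.getD c [] := by
  induction rs generalizing g with
  | nil => simp
  | cons r rs ih =>
    simp only [List.foldl_cons]
    rw [ih (List.nodup_cons.mp hnd).2]
    by_cases hc : c ∈ rs
    · have hne : c ≠ r := fun h => (List.nodup_cons.mp hnd).1 (h ▸ hc)
      simp [hc, PySem.Dict.getD_modify, hne]
    · by_cases hcr : c = r
      · subst hcr
        simp [hc]
      · simp [hc, hcr, PySem.Dict.getD_modify]

lemma insfold_getD (rs : List Int) (c : Int) :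
    ((rs.foldl (fun d r => d.insert r (0 : Int)) PySem.Dict.empty).getD c 0) = 0 := by
  suffices h : ∀ (d : PySem.Dict Int Int), (∀ c', d.getD c' 0 = 0) →
      ((rs.foldl (fun d r => d.insert r (0 : Int)) d).getD c 0) = 0 by
    exact h _ (fun c' => by simp [PySem.Dict.getD_empty])
  induction rs with
  | nil => intro d hd; exact hd c
  | cons r rs ih =>
    intro d hd
    simp only [List.foldl_cons]
    exact ih _ (fun c' => by rw [PySem.Dict.getD_insert]; split_ifs <;> [rfl; exact hd c'])

lemma recon (p : List Int) (k : Int) (hknz : k ≠ 0) {k' : Nat} (hk : 0 < k') (hkk : k' = k.natAbs)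
    (g : PySem.Dict Int (List Int))
    (hg : ∀ r : Nat, r < k' → g.getD (PySem.Int.mod (r : Int) k) [] = PySem.List.sorted (pvCls p k' r) (fun x => x) false)
    (d : PySem.Dict Int Int) (hd : ∀ c, d.getD c 0 = 0) :
    ∀ m, m ≤ p.length →
      (((PySem.List.pyRange 0 (m : Int) 1).foldl
          (fun (st : List Int × PySem.Dict Int Int) i =>
            (PySem.List.pySetD st.1 i
                (PySem.List.pyGetD (g.getD (PySem.Int.mod i k) []) (st.2.getD (PySem.Int.mod i k) 0) 0),
              st.2.insert (PySem.Int.mod i k) (st.2.getD (PySem.Int.mod i k) 0 + 1)))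
          (List.replicate p.length 0, d)).1
        = (List.range p.length).map (fun j => if j < m then pvTarget p k' j else 0))
      ∧ (∀ r : Nat, r < k' →
          (((PySem.List.pyRange 0 (m : Int) 1).foldl
              (fun (st : List Int × PySem.Dict Int Int) i =>
                (PySem.List.pySetD st.1 i
                    (PySem.List.pyGetD (g.getD (PySem.Int.mod i k) []) (st.2.getD (PySem.Int.mod i k) 0) 0),
                  st.2.insert (PySem.Int.mod i k) (st.2.getD (PySem.Int.mod i k) 0 + 1)))
              (List.replicate p.length 0, d)).2.getD (PySem.Int.mod (r : Int) k) 0)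
            = ((List.range m).countP (fun j => j % k' = r) : Int)) := by
  intro m
  induction m with
  | zero =>
    intro _
    rw [show ((0 : Nat) : Int) = 0 from rfl, PySem.List.pyRange_one_eq_nil le_rfl]
    constructor
    · simp only [List.foldl_nil]
      apply List.ext_getElem (by simp)
      intro j hj hj2
      simp
    · intro r hr
      simp only [List.foldl_nil, List.range_zero, List.countP_nil]
      exact_mod_cast hd _
  | succ m ih =>
    intro hm
    obtain ⟨ih1, ih2⟩ := ih (by omega)
    have hcast : ((m + 1 : Nat) : Int) = (m : Int) + 1 := by push_cast; ring
    rw [hcast, PySem.List.pyRange_one_succ_right (by positivity), List.foldl_append,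
      List.foldl_cons, List.foldl_nil]
    have hmod : PySem.Int.mod (m : Int) k = PySem.Int.mod ((m % k' : Nat) : Int) k := by
      rw [hkk]
      exact mod_natCast_mod k hknz m
    have hr0 : m % k' < k' := Nat.mod_lt _ hk
    constructor
    · -- first component
      dsimp only
      rw [hmod, ih1, ih2 _ hr0, countP_mod_self hk m, hg _ hr0,
        PySem.List.pyGetD_natCast, PySem.List.pySetD_natCast]
      apply List.ext_getElem (by simp)
      intro j hj hj2
      simp only [List.length_set, List.length_map, List.length_range] at hj ⊢
      rw [List.getElem_set, List.getElem_map, List.getElem_range]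
      by_cases hjm : m = j
      · subst hjm
        rw [if_pos rfl, List.getElem_map, List.getElem_range, if_pos (by omega : m < m + 1)]
        rfl
      · rw [if_neg hjm, List.getElem_map, List.getElem_range]
        by_cases hlt : j < m
        · rw [if_pos hlt, if_pos (by omega)]
        · rw [if_neg hlt, if_neg (by omega)]
    · -- second component
      intro r hr
      dsimp only
      rw [hmod, ih2 _ hr0, countP_mod_self hk m]
      rw [PySem.Dict.getD_insert]
      by_cases hc : PySem.Int.mod (r : Int) k = PySem.Int.mod ((m % k' : Nat) : Int) k
      · have hrr : r = m % k' := key_inj k hknz (by omega) (by omega) hc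
        rw [if_pos hc]
        subst hrr
        rw [List.range_succ, List.countP_append, countP_mod_self hk m]
        simp
      · have hrr : ¬ (m % k' = r) := fun h => hc (by rw [h])
        rw [if_neg hc, ih2 _ hr, List.range_succ, List.countP_append]
        simp [hrr]

lemma calc_py_eq (n k : Int) (a : List Int) (hn0 : 0 ≤ n) (hn : n ≤ (a.length : Int))
    (hknz : k ≠ 0) :
    calc_py n k a
      = decide (pvL (a.take n.toNat) k.natAbs = PySem.List.sorted a (fun x => x) false) := by
  obtain ⟨N, rfl⟩ : ∃ N : Nat, n = (N : Int) := ⟨n.toNat, (Int.toNat_of_nonneg hn0).symm⟩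
  have hNlen : N ≤ a.length := by exact_mod_cast hn
  have hk' : 0 < k.natAbs := by omega
  set p := a.take N with hp
  have hplen : p.length = N := by rw [hp]; simp; omega
  unfold calc_py
  dsimp only
  rw [Int.toNat_natCast]
  set G1 := (PySem.List.pyRange 0 ((N : Nat) : Int) 1).foldl
      (fun g i =>
        (if g.contains (PySem.Int.mod i k) then g
         else g.insert (PySem.Int.mod i k) ([] : List Int)).modify
          (PySem.Int.mod i k) [] (fun l => l ++ [PySem.List.pyGetD a i 0]))
      PySem.Dict.empty with hG1
  set G2 := G1.keys.foldl
      (fun g r => g.modify r [] (fun l => PySem.List.sorted l (fun x => x) false)) G1 with hG2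
  set D0 := G2.keys.foldl (fun d r => d.insert r (0 : Int)) PySem.Dict.empty with hD0
  have hnodup : G1.keys.Nodup := by
    rw [hG1, show (fun (g : PySem.Dict Int (List Int)) (i : Int) =>
          (if g.contains (PySem.Int.mod i k) then g
           else g.insert (PySem.Int.mod i k) ([] : List Int)).modify
            (PySem.Int.mod i k) [] (fun l => l ++ [PySem.List.pyGetD a i 0]))
        = (fun (g : PySem.Dict Int (List Int)) i =>
            g.modify (PySem.Int.mod i k) [] (fun l => l ++ [PySem.List.pyGetD a i 0]))
        from funext fun g => funext fun i => stepA_eq_modify g _ _,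
      PySem.List.pyRange_zero_nat, List.foldl_map]
    exact PySem.Dict.nodup_keys_foldl_modify_key (List.range N)
      (fun j => PySem.Int.mod ((j : Nat) : Int) k) []
      (fun d j => fun l => l ++ [PySem.List.pyGetD a ((j : Nat) : Int) 0])
      PySem.Dict.empty PySem.Dict.nodup_keys_empty
  have hg2 : ∀ r : Nat, r < k.natAbs →
      G2.getD (PySem.Int.mod (r : Int) k) [] = PySem.List.sorted (pvCls p k.natAbs r) (fun x => x) false := by
    intro r hr
    rw [hG2, sortfold_getD G1.keys hnodup G1 _ _]
    by_cases hm : PySem.Int.mod (r : Int) k ∈ G1.keys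
    · rw [if_pos hm, hG1, groups1_getD a k, filter_range_modK a k hknz hNlen hr]
    · rw [if_neg hm]
      have hcls : pvCls p k.natAbs r = G1.getD (PySem.Int.mod (r : Int) k) [] := by
        rw [hG1, groups1_getD a k, filter_range_modK a k hknz hNlen hr]
      have hnil : G1.getD (PySem.Int.mod (r : Int) k) [] = [] := by
        apply PySem.Dict.getD_of_not_contains
        rw [← Bool.not_eq_true]
        intro hcont
        exact hm ((PySem.Dict.contains_iff_mem_keys _ _).mp hcont)
      rw [hnil, hcls, hnil]
      rfl
  have hd0 : ∀ c, D0.getD c 0 = 0 := fun c => insfold_getD _ c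
  have hrec := (recon p k hknz hk' rfl G2 hg2 D0 hd0 p.length le_rfl).1
  rw [← hplen, hrec]
  have : (List.range p.length).map (fun j => if j < p.length then pvTarget p k.natAbs j else 0)
      = pvL p k.natAbs := by
    rw [pvL]
    apply List.map_congr_left
    intro j hj
    rw [if_pos (List.mem_range.mp hj)]
  rw [this, hp, hplen]

lemma calc_py_nonpos (n k : Int) (a : List Int) (hn0 : n ≤ 0) :
    calc_py n k a = decide (([] : List Int) = PySem.List.sorted a (fun x => x) false) := by
  unfold calc_py
  dsimp only
  rw [PySem.List.pyRange_one_eq_nil hn0]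
  simp only [List.foldl_nil, PySem.Dict.keys_empty]
  rw [Int.toNat_of_nonpos hn0, List.replicate_zero]
  rfl

-- ===== B-side characterization =====

lemma pvGo_iff (k : Int) (a : List Int) (is : List Int) (d : PySem.Dict (Int × Int) Int)
    (hnd : d.keys.Nodup) (hpos : ∀ key, 0 ≤ d.getD key 0) :
    (pvGo k a is d = true ↔
      ∀ key : Int × Int,
        ((is.map (fun i => (PySem.Int.mod i k, PySem.List.pyGetD a i 0))).count key : Int)
          = d.getD key 0) := by
  induction is generalizing d with
  | nil =>
    simp only [pvGo, List.map_nil, List.count_nil, Nat.cast_zero]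
    constructor
    · intro h key
      rw [List.all_eq_true] at h
      by_cases hc : d.contains key
      · have hkeys := (PySem.Dict.contains_iff_mem_keys _ _).mp hc
        have hv : d.getD key 0 ∈ d.values := by
          rw [PySem.Dict.values_eq_map_keys d hnd 0]
          exact List.mem_map.mpr ⟨key, hkeys, rfl⟩
        have := h _ hv
        rw [beq_iff_eq] at this
        omega
      · rw [PySem.Dict.getD_of_not_contains d 0 (by simpa using hc)]
    · intro h
      rw [List.all_eq_true]
      intro v hv
      rw [PySem.Dict.values_eq_map_keys d hnd 0] at hv
      obtain ⟨key, hkey, rfl⟩ := List.mem_map.mp hv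
      rw [beq_iff_eq]
      exact (h key).symm
  | cons i rest ih =>
    simp only [pvGo, List.map_cons]
    set key0 : Int × Int := (PySem.Int.mod i k, PySem.List.pyGetD a i 0) with hkey0
    by_cases h0 : d.getD key0 0 = 0
    · rw [if_pos (by simpa using h0)]
      simp only [Bool.false_eq_true, false_iff]
      intro hall
      have := hall key0
      rw [List.count_cons_self, h0] at this
      omega
    · rw [if_neg (by simpa using h0)]
      have hpos0 : 1 ≤ d.getD key0 0 := by have := hpos key0; omega
      rw [ih (d.insert key0 (d.getD key0 0 - 1)) (PySem.Dict.nodup_keys_insert _ _ _ hnd)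
        (fun key => by
          rw [PySem.Dict.getD_insert]
          split_ifs with h
          · omega
          · exact hpos key)]
      constructor
      · intro h key
        have hthis := h key
        rw [PySem.Dict.getD_insert] at hthis
        by_cases hk2 : key = key0
        · subst hk2
          rw [if_pos rfl] at hthis
          rw [List.count_cons_self]
          push_cast
          omega
        · rw [if_neg hk2] at hthis
          rw [List.count_cons, if_neg (fun h : (key0 == key) = true => hk2 (beq_iff_eq.mp h).symm), Nat.add_zero]
          exact hthis
      · intro h key
        rw [PySem.Dict.getD_insert]
        have hthis := h key
        by_cases hk2 : key = key0
        · subst hk2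
          rw [if_pos rfl]
          rw [List.count_cons_self] at hthis
          push_cast at hthis
          omega
        · rw [if_neg hk2]
          rw [List.count_cons, if_neg (fun h : (key0 == key) = true => hk2 (beq_iff_eq.mp h).symm), Nat.add_zero] at hthis
          exact hthis

lemma need_spec (k : Int) (s : List Int) :
    (((PySem.List.enumerate s).foldl
        (fun d p => d.insert (PySem.Int.mod p.1 k, p.2) (d.getD (PySem.Int.mod p.1 k, p.2) 0 + 1))
        (PySem.Dict.empty : PySem.Dict (Int × Int) Int)).keys.Nodup)
    ∧ ∀ key : Int × Int,
      ((PySem.List.enumerate s).foldl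
        (fun d p => d.insert (PySem.Int.mod p.1 k, p.2) (d.getD (PySem.Int.mod p.1 k, p.2) 0 + 1))
        (PySem.Dict.empty : PySem.Dict (Int × Int) Int)).getD key 0
      = (((PySem.List.enumerate s).map (fun p => (PySem.Int.mod p.1 k, p.2))).count key : Int) := by
  have hfold : ((PySem.List.enumerate s).foldl
        (fun d p => d.insert (PySem.Int.mod p.1 k, p.2) (d.getD (PySem.Int.mod p.1 k, p.2) 0 + 1))
        (PySem.Dict.empty : PySem.Dict (Int × Int) Int))
      = ((PySem.List.enumerate s).map (fun p => (PySem.Int.mod p.1 k, p.2))).foldl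
          (fun d key => d.insert key (d.getD key 0 + 1))
          (PySem.Dict.empty : PySem.Dict (Int × Int) Int) := by
    rw [List.foldl_map]
  constructor
  · rw [hfold]
    exact PySem.Dict.nodup_keys_foldl_insert _ _ _ PySem.Dict.nodup_keys_empty
  · intro key
    rw [hfold, PySem.Dict.getD_foldl_insert_add_one]
    simp [PySem.Dict.getD_empty]

-- the stream of keys of a list over index range N, in (range N) form
lemma enumerate_stream (k : Int) (s : List Int) :
    (PySem.List.enumerate s).map (fun p => (PySem.Int.mod p.1 k, p.2))
      = (List.range s.length).map (fun (i : Nat) => (PySem.Int.mod (i : Int) k, s.getD i 0)) := by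
  rw [PySem.List.enumerate_eq_map_pyRange s 0,
    show PySem.List.len s = ((s.length : Nat) : Int) from rfl, PySem.List.pyRange_zero_nat,
    List.map_map, List.map_map]
  apply List.map_congr_left
  intro i hi
  simp only [Function.comp_def, PySem.List.pyGetD_natCast]

lemma count_range_stream (l : List Int) (k : Int) (hknz : k ≠ 0) {N : Nat} (hN : N ≤ l.length)
    {r : Nat} (hr : r < k.natAbs) (x : Int) :
    ((List.range N).map (fun (i : Nat) => (PySem.Int.mod (i : Int) k, l.getD i 0))).count
        ((PySem.Int.mod (r : Int) k, x) : Int × Int)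
      = (pvCls (l.take N) k.natAbs r).count x := by
  have hk : 0 < k.natAbs := by omega
  rw [cls_take_eq_filter l hN hk hr]
  rw [List.count_eq_countP, List.countP_map, List.count_eq_countP, List.countP_map,
    List.countP_filter]
  apply List.countP_congr
  intro j hj
  rw [List.mem_range] at hj
  simp only [Function.comp_def, beq_iff_eq, Prod.mk.injEq, Bool.and_eq_true, decide_eq_true_eq]
  constructor
  · rintro ⟨h1, h2⟩
    have : j % k.natAbs = r := by
      rw [mod_natCast_mod k hknz j] at h1
      exact key_inj k hknz (Nat.mod_lt _ hk) hr h1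
    exact ⟨h2, this⟩
  · rintro ⟨h2, h1⟩
    refine ⟨?_, h2⟩
    rw [mod_natCast_mod k hknz j, h1]

lemma stream_counts_iff (a s : List Int) (k : Int) (hknz : k ≠ 0) {N : Nat} (hN : N ≤ a.length) :
    (∀ key : Int × Int,
        ((List.range N).map (fun (i : Nat) => (PySem.Int.mod (i : Int) k, a.getD i 0))).count key
          = ((List.range s.length).map (fun (i : Nat) => (PySem.Int.mod (i : Int) k, s.getD i 0))).count key)
      ↔ ∀ r < k.natAbs, (pvCls (a.take N) k.natAbs r).Perm (pvCls s k.natAbs r) := by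
  have hk : 0 < k.natAbs := by omega
  constructor
  · intro h r hr
    rw [List.perm_iff_count]
    intro x
    have := h (PySem.Int.mod (r : Int) k, x)
    rw [count_range_stream a k hknz hN hr, count_range_stream s k hknz le_rfl hr,
      List.take_length] at this
    exact this
  · intro h key
    by_cases hform : ∃ r : Nat, r < k.natAbs ∧ key.1 = PySem.Int.mod (r : Int) k
    · obtain ⟨r, hr, hk1⟩ := hform
      have hkey : key = (PySem.Int.mod (r : Int) k, key.2) := by
        rw [← hk1]
      rw [hkey, count_range_stream a k hknz hN hr, count_range_stream s k hknz le_rfl hr,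
        List.take_length]
      exact List.perm_iff_count.mp (h r hr) key.2
    · have hz : ∀ (l : List Int) (M : Nat),
          ((List.range M).map (fun (i : Nat) => (PySem.Int.mod (i : Int) k, l.getD i 0))).count key = 0 := by
        intro l M
        rw [List.count_eq_zero]
        intro hmem
        obtain ⟨i, _, hi⟩ := List.mem_map.mp hmem
        exact hform ⟨i % k.natAbs, Nat.mod_lt _ hk, by rw [← hi, ← mod_natCast_mod k hknz i]⟩
      rw [hz, hz]

lemma calc_py_alt_iff (n k : Int) (a : List Int) :
    (calc_py_alt n k a = true ↔
      ∀ key : Int × Int,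
        (((PySem.List.pyRange 0 n 1).map
            (fun i => (PySem.Int.mod i k, PySem.List.pyGetD a i 0))).count key : Int)
          = (((List.range (PySem.List.sorted a (fun x => x) false).length).map
              (fun (i : Nat) => (PySem.Int.mod (i : Int) k,
                (PySem.List.sorted a (fun x => x) false).getD i 0))).count key : Int)) := by
  unfold calc_py_alt
  dsimp only
  obtain ⟨hnd, hgd⟩ := need_spec k (PySem.List.sorted a (fun x => x) false)
  rw [pvGo_iff k a _ _ hnd (fun key => by rw [hgd key]; positivity)]
  constructor
  · intro h key
    rw [← enumerate_stream, ← hgd key]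
    exact h key
  · intro h key
    rw [hgd key, enumerate_stream]
    exact h key

-- ===== VERDICT (by name: the statement is the Claim_ definition above) =====
theorem calc_py_spec : Claim_equal_calc_py := by
  intro n k a _hdom hpre
  obtain ⟨hn, hk⟩ := hpre
  unfold Spec_calc_py
  rcases hk with hknz | hanil
  case inr =>
    -- a = [] (any k): both sides are True
    subst hanil
    have hn0 : n ≤ 0 := by simpa using hn
    rw [calc_py_nonpos n k [] hn0]
    have hB : calc_py_alt n k [] = true := by
      unfold calc_py_alt
      rw [PySem.List.pyRange_one_eq_nil hn0]
      rfl
    rw [hB]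
    rfl
  case inl =>
    have hk' : 0 < k.natAbs := by omega
    rw [Bool.eq_iff_iff, calc_py_alt_iff n k a]
    rcases lt_or_ge n 0 with hn0 | hn0
    · -- n < 0: A compares [] with sorted(a); B's consuming loop is empty
      rw [calc_py_nonpos n k a (by omega), decide_eq_true_eq,
        PySem.List.pyRange_one_eq_nil (by omega)]
      simp only [List.map_nil, List.count_nil, Nat.cast_zero]
      set s := PySem.List.sorted a (fun x => x) false with hs
      constructor
      · intro h key
        rw [← h]
        simp
      · intro h
        have hlen : s.length = 0 := by
          by_contra hne
          have hpos : 0 < s.length := Nat.pos_of_ne_zero hne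
          have hmem : ((PySem.Int.mod ((0 : Nat) : Int) k, s.getD 0 0) : Int × Int)
              ∈ (List.range s.length).map
                (fun (i : Nat) => (PySem.Int.mod (i : Int) k, s.getD i 0)) :=
            List.mem_map.mpr ⟨0, List.mem_range.mpr hpos, rfl⟩
          have hcnt := List.count_pos_iff.mpr hmem
          have := h (PySem.Int.mod ((0 : Nat) : Int) k, s.getD 0 0)
          omega
        exact (List.eq_nil_of_length_eq_zero hlen).symm
    · -- 0 ≤ n ≤ len(a)
      obtain ⟨N, hNn⟩ : ∃ N : Nat, n = (N : Int) := ⟨n.toNat, (Int.toNat_of_nonneg hn0).symm⟩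
      have hNlen : N ≤ a.length := by rw [hNn] at hn; exact_mod_cast hn
      rw [calc_py_eq n k a hn0 hn hknz, decide_eq_true_eq]
      have hprefix : (PySem.List.pyRange 0 n 1).map
            (fun i => (PySem.Int.mod i k, PySem.List.pyGetD a i 0))
          = (List.range N).map (fun (i : Nat) => (PySem.Int.mod (i : Int) k, a.getD i 0)) := by
        rw [hNn, PySem.List.pyRange_zero_nat, List.map_map]
        apply List.map_congr_left
        intro i _
        simp only [Function.comp_def, PySem.List.pyGetD_natCast]
      rw [hprefix]
      have hNtoNat : n.toNat = N := by omega
      rw [hNtoNat]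
      calc pvL (a.take N) k.natAbs = PySem.List.sorted a (fun x => x) false
            ↔ ∀ r < k.natAbs, (pvCls (a.take N) k.natAbs r).Perm
                (pvCls (PySem.List.sorted a (fun x => x) false) k.natAbs r) :=
          main_iff (a.take N) a hk'
        _ ↔ _ := by
          rw [← stream_counts_iff a (PySem.List.sorted a (fun x => x) false) k hknz hNlen]
          constructor
          · intro h key
            exact_mod_cast h key
          · intro h key
            exact_mod_cast h key
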